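-- pv_equiv track=rewrite | github.com/AdamOtto/Daily-Challenges | Challenge370.py | Solution
-- ===== SOURCE A (Python) =====
-- def Solution(ar):
--     d = {}
--     dropOff = None
--     pickUp = None
--     retVal = 0
--     for i in range(len(ar)):
--         if ar[i][2] == 'dropoff':
--             if dropOff is not None:
--                 dropOff = min(dropOff, ar[i][1])
--             else:
--                 dropOff = ar[i][1]
--         else:
--             if dropOff is not None:
--                 retVal += max(0, dropOff - pickUp)
--                 dropOff = None
--                 pickUp = None
--             if pickUp is not None:
--                 pickUp = min(ar[i][1], pickUp)
--             else:
--                 pickUp = ar[i][1]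
--
--     if dropOff is not None:
--                 retVal += max(0, dropOff - pickUp)
--                 dropOff = None
--
--     return retVal
-- ===== SOURCE B (Python) =====
-- def Solution(ar):
--     # Phase 1: collapse the list into maximal consecutive runs of the same kind,
--     # keeping only (is_dropoff, minimum distance of the run).
--     runs = []
--     for _, dist, kind in ar:
--         d = (kind == 'dropoff')
--         if runs and runs[-1][0] == d:
--             if dist < runs[-1][1]:
--                 runs[-1] = (d, dist)
--         else:
--             runs.append((d, dist))
--     # Phase 2: each dropoff run is immediately preceded by a pickup run;
--     # the answer is the sum of max(0, dropoff_min - pickup_min) over these pairs.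
--     total = 0
--     for k in range(1, len(runs)):
--         if runs[k][0]:
--             total += max(0, runs[k][1] - runs[k - 1][1])
--     return total
-- ===== Notes on version B (the rewrite author's own statement) =====
-- stated objective: alternative
-- what changed: Replaces A's element-wise Option-state machine (running mins, in-loop flushes, trailing flush) by a two-phase decomposition: first collapse the list into consecutive runs (is_dropoff, run minimum), then sum max(0, dropoff_min - preceding pickup_min) over adjacent run pairs, with no pending state to flush.
import Mathlib
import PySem

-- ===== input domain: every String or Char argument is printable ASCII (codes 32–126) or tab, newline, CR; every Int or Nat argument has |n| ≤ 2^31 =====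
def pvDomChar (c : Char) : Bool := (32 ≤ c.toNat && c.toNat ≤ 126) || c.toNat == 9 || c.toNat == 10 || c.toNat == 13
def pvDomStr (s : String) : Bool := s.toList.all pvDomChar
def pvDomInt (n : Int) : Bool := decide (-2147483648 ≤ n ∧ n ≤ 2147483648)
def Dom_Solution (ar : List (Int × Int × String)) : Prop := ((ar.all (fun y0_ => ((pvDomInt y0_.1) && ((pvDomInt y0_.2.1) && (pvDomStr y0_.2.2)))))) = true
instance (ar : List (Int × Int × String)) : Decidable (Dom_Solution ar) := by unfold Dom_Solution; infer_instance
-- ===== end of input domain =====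

-- B replaces A's element-wise Option-state machine by a two-phase run-collapse + adjacent-pair sum (alternative decomposition, same cost; return-value equivalence on lists not starting with a dropoff, where A raises TypeError).


-- ===== PORT A =====
-- One step of A's loop body (state = (dropOff, pickUp, retVal)); the `none`
-- branch of the flush (pickUp = None, where Python raises TypeError) is
-- excluded by Pre_Solution and left as `retVal` unchanged.
def SolutionStep (st : Option Int × Option Int × Int) (x : Int × Int × String) :
    Option Int × Option Int × Int :=
  let dropOff := st.1
  let pickUp := st.2.1
  let retVal := st.2.2
  if x.2.2 == "dropoff" then
    match dropOff with
    | some d => (some (min d x.2.1), pickUp, retVal)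
    | none => (some x.2.1, pickUp, retVal)
  else
    let st2 : Option Int × Option Int × Int :=
      match dropOff with
      | some d =>
        (none, none,
          match pickUp with
          | some p => retVal + max 0 (d - p)
          | none => retVal)  -- Python raises TypeError here; outside Pre_Solution
      | none => (dropOff, pickUp, retVal)
    match st2.2.1 with
    | some p => (st2.1, some (min x.2.1 p), st2.2.2)
    | none => (st2.1, some x.2.1, st2.2.2)

-- the trailing `if dropOff is not None:` flush after the loop
def SolutionFinish (st : Option Int × Option Int × Int) : Int :=
  match st.1 with
  | some d =>
    (match st.2.1 with
     | some p => st.2.2 + max 0 (d - p)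
     | none => st.2.2)  -- Python raises TypeError here; outside Pre_Solution
  | none => st.2.2

def Solution (ar : List (Int × Int × String)) : Int :=
  SolutionFinish (ar.foldl SolutionStep (none, none, 0))

-- ===== PORT B =====
-- Phase 1 step: extend the (reversed) run list with one record, merging into
-- the newest run if it has the same kind (Source B appends/updates at the tail;
-- the accumulator here keeps the newest run at the head and is reversed once).
def SolutionAltRun (runs : List (Bool × Int)) (x : Int × Int × String) :
    List (Bool × Int) :=
  let d := x.2.2 == "dropoff"
  match runs with
  | (d', m) :: rest =>
    if d' == d then (d', if x.2.1 < m then x.2.1 else m) :: rest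
    else (d, x.2.1) :: (d', m) :: rest
  | [] => [(d, x.2.1)]

def Solution_alt (ar : List (Int × Int × String)) : Int :=
  let runs := (ar.foldl SolutionAltRun []).reverse
  -- Phase 2: for k in range(1, len(runs)): if runs[k][0]: total += max(0, ...)
  (runs.zip (runs.drop 1)).foldl
    (fun total pr => if pr.2.1 then total + max 0 (pr.2.2 - pr.1.2) else total) 0

-- ===== PRECONDITION & SPEC =====
-- Pre_ excludes exactly the inputs where A raises TypeError: a non-empty list
-- whose first record is a 'dropoff' (the flush then computes `dropOff - None`).
def Pre_Solution (ar : List (Int × Int × String)) : Prop :=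
  (ar.head?.all (fun x => !(x.2.2 == "dropoff"))) = true
instance (ar : List (Int × Int × String)) : Decidable (Pre_Solution ar) := by
  unfold Pre_Solution; infer_instance

def pvWitness_Solution : (List (Int × Int × String)) :=
  [(0, 3, "pickup"), (1, 7, "dropoff"), (2, 2, "dropoff"), (3, 1, "pickup")]

def Spec_Solution (ar : List (Int × Int × String)) (out : Int) : Prop := out = Solution_alt ar
instance (ar : List (Int × Int × String)) (out : Int) : Decidable (Spec_Solution ar out) := by unfold Spec_Solution; infer_instance

-- ===== CLAIM (what is proved, stated in full; the proofs are below) =====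
def Claim_equal_Solution : Prop := ∀ (ar : List (Int × Int × String)), Dom_Solution ar → Pre_Solution ar → Spec_Solution ar (Solution ar)
-- ===== LEMMAS AND PROOFS =====

-- pair-sum on the REVERSED run list (newest run first): each run that is a
-- dropoff contributes max 0 (its min - the min of the run before it).
def psumR : List (Bool × Int) → Int
  | a :: b :: rest => (if a.1 then max 0 (a.2 - b.2) else 0) + psumR (b :: rest)
  | _ => 0

-- well-formed reversed run list: booleans alternate and the OLDEST run is a pickup
def wfR : List (Bool × Int) → Bool
  | [] => false
  | [(b, _)] => b == false
  | a :: b :: rest => (a.1 != b.1) && wfR (b :: rest)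

-- A's loop state as a function of the reversed run list of the processed prefix
def astate : List (Bool × Int) → Option Int × Option Int × Int
  | [] => (none, none, 0)
  | (false, m) :: rest => (none, some m, psumR ((false, m) :: rest))
  | [(true, m)] => (some m, none, 0)
  | (true, m) :: (b, p) :: rest => (some m, some p, psumR ((b, p) :: rest))

theorem psumR_false_cons (m m' : Int) (rest : List (Bool × Int)) :
    psumR ((false, m) :: rest) = psumR ((false, m') :: rest) := by
  cases rest with
  | nil => rfl
  | cons b r => simp [psumR]

theorem wfR_step (R : List (Bool × Int)) (x : Int × Int × String)
    (h : wfR R = true) : wfR (SolutionAltRun R x) = true := by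
  cases R with
  | nil => exact absurd h (by decide)
  | cons a rest =>
    obtain ⟨b, m⟩ := a
    by_cases hd : (b == (x.2.2 == "dropoff"))
    · simp only [SolutionAltRun, hd, if_true]
      cases rest with
      | nil => simpa [wfR] using h
      | cons c r => simpa [wfR] using h
    · have hd' : (b == (x.2.2 == "dropoff")) = false := by
        cases hb : (b == (x.2.2 == "dropoff")) with
        | false => rfl
        | true => exact absurd hb hd
      simp only [SolutionAltRun, hd', Bool.false_eq_true, if_false]
      simp only [wfR, Bool.and_eq_true, bne_iff_ne]
      refine ⟨?_, h⟩
      intro he; exact hd (by simp [he])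

theorem astate_step (R : List (Bool × Int)) (x : Int × Int × String)
    (h : wfR R = true) :
    SolutionStep (astate R) x = astate (SolutionAltRun R x) := by
  by_cases hd : x.2.2 == "dropoff"
  · -- dropoff record
    cases R with
    | nil => exact absurd h (by decide)
    | cons a rest =>
      obtain ⟨b, m⟩ := a
      cases b with
      | false =>
        -- newest run is a pickup: start a new dropoff run
        simp only [SolutionAltRun, hd]
        simp only [show ((false : Bool) == true) = false from rfl, if_false]
        cases rest with
        | nil => simp [astate, SolutionStep, hd, psumR]
        | cons c r => simp [astate, SolutionStep, hd]
      | true =>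
        -- newest run is a dropoff: merge
        cases rest with
        | nil => simp [wfR] at h
        | cons c r =>
          obtain ⟨cb, cm⟩ := c
          have hcb : cb = false := by
            cases cb with
            | false => rfl
            | true => simp [wfR] at h
          subst hcb
          simp only [SolutionAltRun, hd]
          simp only [show ((true : Bool) == true) = true from rfl, if_true]
          simp only [astate, SolutionStep, hd, if_true]
          refine Prod.ext ?_ rfl
          simp only
          congr 1
          rcases lt_trichotomy x.2.1 m with hlt | heq | hgt
          · simp [hlt, min_eq_right (le_of_lt hlt)]
          · simp [heq]
          · simp [not_lt.mpr (le_of_lt hgt), min_eq_left (le_of_lt hgt)]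
  · -- pickup record
    cases R with
    | nil =>
      simp [astate, SolutionStep, SolutionAltRun, hd, psumR]
    | cons a rest =>
      obtain ⟨b, m⟩ := a
      cases b with
      | false =>
        -- newest run is a pickup: merge, no flush
        simp only [SolutionAltRun, hd]
        simp only [show ((false : Bool) == false) = true from rfl, if_true]
        have hm : astate ((false, if x.2.1 < m then x.2.1 else m) :: rest)
            = (none, some (if x.2.1 < m then x.2.1 else m), psumR ((false, m) :: rest)) := by
          simp [astate, psumR_false_cons (if x.2.1 < m then x.2.1 else m) m rest]
        rw [hm]
        simp only [astate, SolutionStep, hd]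
        simp only [Bool.false_eq_true, if_false]
        refine Prod.ext rfl (Prod.ext ?_ rfl)
        simp only
        congr 1
        rcases lt_trichotomy x.2.1 m with hlt | heq | hgt
        · simp [hlt, min_eq_left (le_of_lt hlt)]
        · simp [heq]
        · simp [not_lt.mpr (le_of_lt hgt), min_eq_right (le_of_lt hgt)]
      | true =>
        -- newest run is a dropoff: flush, start new pickup run
        cases rest with
        | nil => simp [wfR] at h
        | cons c r =>
          obtain ⟨cb, cm⟩ := c
          have hcb : cb = false := by
            cases cb with
            | false => rfl
            | true => simp [wfR] at h
          subst hcb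
          simp only [SolutionAltRun, hd]
          simp only [show ((true : Bool) == false) = false from rfl, if_false]
          simp only [astate, SolutionStep, hd, psumR]
          simp only [Bool.false_eq_true, if_false]
          refine Prod.ext rfl (Prod.ext rfl ?_)
          simp [psumR]
          ring
  
theorem finish_astate (R : List (Bool × Int)) (h : wfR R = true) :
    SolutionFinish (astate R) = psumR R := by
  cases R with
  | nil => rfl
  | cons a rest =>
    obtain ⟨b, m⟩ := a
    cases b with
    | false => simp [astate, SolutionFinish]
    | true =>
      cases rest with
      | nil => simp [wfR] at h
      | cons c r =>
        obtain ⟨cb, cm⟩ := c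
        have hcb : cb = false := by
          cases cb with
          | false => rfl
          | true => simp [wfR] at h
        subst hcb
        simp only [astate, SolutionFinish, psumR, if_true]
        ring

theorem main_fold (xs : List (Int × Int × String)) :
    ∀ R, wfR R = true →
    SolutionFinish (xs.foldl SolutionStep (astate R)) = psumR (xs.foldl SolutionAltRun R) := by
  induction xs with
  | nil => intro R h; exact finish_astate R h
  | cons x xs ih =>
    intro R h
    simp only [List.foldl_cons]
    rw [astate_step R x h]
    exact ih _ (wfR_step R x h)

-- bridge: B's phase-2 fold over zipped adjacent pairs equals psumR of the reversed list
def psumF : List (Bool × Int) → Int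
  | a :: b :: rest => (if b.1 then max 0 (b.2 - a.2) else 0) + psumF (b :: rest)
  | _ => 0

theorem zipfold_psumF (runs : List (Bool × Int)) : ∀ (t : Int),
    (runs.zip (runs.drop 1)).foldl
      (fun total pr => if pr.2.1 then total + max 0 (pr.2.2 - pr.1.2) else total) t
    = t + psumF runs := by
  induction runs with
  | nil => intro t; simp [psumF]
  | cons a rest ih =>
    intro t
    cases rest with
    | nil => simp [psumF]
    | cons b r =>
      simp only [List.drop_one, List.tail_cons, List.zip_cons_cons, List.foldl_cons]
      have := ih (t := if b.1 then t + max 0 (b.2 - a.2) else t)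
      simp only [List.drop_one, List.tail_cons] at this
      rw [this]
      simp only [psumF]
      split_ifs <;> ring

theorem psumF_snoc_snoc (l : List (Bool × Int)) (b a : Bool × Int) :
    psumF ((l ++ [b]) ++ [a]) = psumF (l ++ [b]) + (if a.1 then max 0 (a.2 - b.2) else 0) := by
  induction l with
  | nil => simp [psumF]; try ring
  | cons c l ih =>
    cases l with
    | nil => simp [psumF]; try ring
    | cons d l =>
      simp only [List.cons_append, psumF] at ih ⊢
      rw [ih]
      ring

theorem psumF_reverse (R : List (Bool × Int)) : psumF R.reverse = psumR R := by
  induction R with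
  | nil => rfl
  | cons a rest ih =>
    cases rest with
    | nil => rfl
    | cons b r =>
      have hb : (b :: r).reverse = r.reverse ++ [b] := by simp
      simp only [psumR]
      rw [← ih]
      have : (a :: b :: r).reverse = (r.reverse ++ [b]) ++ [a] := by simp
      rw [this, hb, psumF_snoc_snoc]
      ring

theorem alt_eq_psumR (ar : List (Int × Int × String)) :
    Solution_alt ar = psumR (ar.foldl SolutionAltRun []) := by
  unfold Solution_alt
  rw [zipfold_psumF, psumF_reverse]
  ring

-- ===== VERDICT (by name: the statement is the Claim_ definition above) =====
theorem Solution_spec : Claim_equal_Solution := by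
  intro ar _ hpre
  unfold Spec_Solution
  rw [alt_eq_psumR]
  cases ar with
  | nil => rfl
  | cons x xs =>
    have hx : (x.2.2 == "dropoff") = false := by
      simp [Pre_Solution] at hpre
      simpa using hpre
    unfold Solution
    simp only [List.foldl_cons]
    have h1 : SolutionStep (none, none, 0) x = astate [(false, x.2.1)] := by
      simp [SolutionStep, astate, hx, psumR]
    have h2 : SolutionAltRun [] x = [(false, x.2.1)] := by
      simp [SolutionAltRun, hx]
    rw [h1, main_fold xs [(false, x.2.1)] (by simp [wfR]), ← h2]
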